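-- pv_equiv track=rewrite | github.com/pytorch/helion | benchmarks/blackwell-attn-plot.py | assign_colors
-- ===== SOURCE A (Python) =====
-- DEFAULT_PALETTE = ["blue", "green", "red", "yellow", "magenta", "cyan", "white", "gray"]
--
-- def format_tuple(t: tuple[str, ...]) -> str:
--     """Format tuple for display."""
--     if len(t) == 1:
--         return t[0]
--     return "(" + ", ".join(t) + ")"
--
-- def assign_colors(
--     legend_keys: list[tuple], custom_colors: dict[str, str]
-- ) -> dict[tuple, str]:
--     """Assign colors to legend keys."""
--     color_map = {}
--     palette_idx = 0
--
--     for key in legend_keys: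
--         key_str = format_tuple(key)
--
--         # Check if custom color is specified
--         if key_str in custom_colors:
--             color_map[key] = custom_colors[key_str]
--         else:
--             # Auto-assign from palette
--             color_map[key] = DEFAULT_PALETTE[palette_idx % len(DEFAULT_PALETTE)]
--             palette_idx += 1
--
--     return color_map
-- ===== SOURCE B (Python) =====
-- DEFAULT_PALETTE = ["blue", "green", "red", "yellow", "magenta", "cyan", "white", "gray"]
--
-- def format_tuple(t):
--     """Format tuple for display."""
--     if len(t) == 1:
--         return t[0]
--     return "(" + ", ".join(t) + ")"
--
-- def assign_colors(legend_keys, custom_colors):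
--     """Assign colors to legend keys: partition, index the palette, assemble."""
--     noncustom = [k for k in legend_keys if format_tuple(k) not in custom_colors]
--     palette_for = {k: DEFAULT_PALETTE[i % len(DEFAULT_PALETTE)] for i, k in enumerate(noncustom)}
--     color_map = {}
--     for key in legend_keys:
--         key_str = format_tuple(key)
--         color_map[key] = custom_colors[key_str] if key_str in custom_colors else palette_for[key]
--     return color_map
-- ===== Notes on version B (the rewrite author's own statement) =====
-- stated objective: alternative
-- what changed: Replaces A's single stateful-counter pass (a dict plus a running palette index mutated per iteration) with a partition-then-index-then-assemble structure: filter out the non-custom keys, precompute a palette-assignment dict by enumeration, then assemble the result with pure per-key lookups.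
import Mathlib
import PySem

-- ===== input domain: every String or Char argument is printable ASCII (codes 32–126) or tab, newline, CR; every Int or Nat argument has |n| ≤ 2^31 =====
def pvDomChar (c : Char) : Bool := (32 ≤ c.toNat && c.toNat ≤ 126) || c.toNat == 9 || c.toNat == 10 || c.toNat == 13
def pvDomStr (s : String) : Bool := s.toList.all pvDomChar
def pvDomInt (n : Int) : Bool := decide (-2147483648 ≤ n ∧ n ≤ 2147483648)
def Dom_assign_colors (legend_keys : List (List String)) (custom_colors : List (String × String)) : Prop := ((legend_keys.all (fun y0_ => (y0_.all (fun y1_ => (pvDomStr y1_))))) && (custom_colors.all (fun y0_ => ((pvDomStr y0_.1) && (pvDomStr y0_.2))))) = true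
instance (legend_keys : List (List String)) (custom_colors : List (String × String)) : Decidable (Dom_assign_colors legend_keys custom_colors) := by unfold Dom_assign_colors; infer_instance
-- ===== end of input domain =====

-- B replaces A's single stateful-counter pass by a partition / enumerate / assemble
-- decomposition (objective: alternative; same cost, no speed claim).

-- ===== PORT A =====
-- DEFAULT_PALETTE (module constant, shared by both ports)
def pvPalette : List String := ["blue", "green", "red", "yellow", "magenta", "cyan", "white", "gray"]

-- format_tuple (module helper, shared by both ports); t[0] is in range in its branch
-- (len(t) == 1), so '.getD ""' is never the default
def fmtTuple (t : List String) : String :=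
  if PySem.List.len t == 1 then (PySem.List.pyGet? t 0).getD ""
  else "(" ++ PySem.Str.join ", " t ++ ")"

-- the loop body of A: state = (color_map, palette_idx); DEFAULT_PALETTE[palette_idx % 8]
-- is always in range since the index is mod 8, so pyGetD's default is never used
def aStep (cc : PySem.Dict String String)
    (st : PySem.Dict (List String) String × Int) (key : List String) :
    PySem.Dict (List String) String × Int :=
  let key_str := fmtTuple key
  if cc.contains key_str then
    (st.1.insert key ((cc.get? key_str).getD ""), st.2)
  else
    (st.1.insert key (PySem.List.pyGetD pvPalette (PySem.Int.mod st.2 8) ""), st.2 + 1)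

def assign_colors (legend_keys : List (List String)) (custom_colors : List (String × String)) : List (List String × String) :=
  let cc := PySem.Dict.mk custom_colors
  (legend_keys.foldl (aStep cc) (PySem.Dict.empty, 0)).1.items

-- ===== PORT B =====
-- palette_for[key] in Source B is only looked up for non-custom keys, which are exactly the
-- keys of palette_for, so '.getD ""' is never the default
def assign_colors_alt (legend_keys : List (List String)) (custom_colors : List (String × String)) : List (List String × String) :=
  let cc := PySem.Dict.mk custom_colors
  let noncustom := legend_keys.filter (fun k => !cc.contains (fmtTuple k))
  let palette_for := (PySem.List.enumerate noncustom 0).foldl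
    (fun p ik => p.insert ik.2 (PySem.List.pyGetD pvPalette (PySem.Int.mod ik.1 8) ""))
    PySem.Dict.empty
  (legend_keys.foldl
    (fun m key =>
      let key_str := fmtTuple key
      m.insert key (if cc.contains key_str then (cc.get? key_str).getD ""
                    else (palette_for.get? key).getD ""))
    PySem.Dict.empty).items

-- ===== PRECONDITION & SPEC =====
def Spec_assign_colors (legend_keys : List (List String)) (custom_colors : List (String × String)) (out : List (List String × String)) : Prop := out = assign_colors_alt legend_keys custom_colors
instance (legend_keys : List (List String)) (custom_colors : List (String × String)) (out : List (List String × String)) : Decidable (Spec_assign_colors legend_keys custom_colors out) := by unfold Spec_assign_colors; infer_instance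

-- ===== CLAIM (what is proved, stated in full; the proofs are below) =====
def Claim_equal_assign_colors : Prop := ∀ (legend_keys : List (List String)) (custom_colors : List (String × String)), Dom_assign_colors legend_keys custom_colors → Spec_assign_colors legend_keys custom_colors (assign_colors legend_keys custom_colors)

-- ===== LEMMAS AND PROOFS =====

-- proof-only abbreviations
def ncPred (cc : PySem.Dict String String) (k : List String) : Bool := !cc.contains (fmtTuple k)

def vBf (cc : PySem.Dict String String) (pal : PySem.Dict (List String) String) (k : List String) : String :=
  if cc.contains (fmtTuple k) then (cc.get? (fmtTuple k)).getD "" else (pal.get? k).getD ""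

def foldIns (v : List String → String) (m : PySem.Dict (List String) String) (lk : List (List String)) : PySem.Dict (List String) String :=
  lk.foldl (fun m k => m.insert k (v k)) m

def palD (cc : PySem.Dict String String) (lk : List (List String)) : PySem.Dict (List String) String :=
  (PySem.List.enumerate (lk.filter (ncPred cc)) 0).foldl
    (fun p ik => p.insert ik.2 (PySem.List.pyGetD pvPalette (PySem.Int.mod ik.1 8) "")) PySem.Dict.empty

-- items with the value at key x blanked out: two dicts related by Rx differ at most in x's value
def maskx (x : List String) (p : List String × String) : List String × String :=
  (p.1, if p.1 = x then "" else p.2)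

def Rx (x : List String) (m₁ m₂ : PySem.Dict (List String) String) : Prop :=
  m₁.items.map (maskx x) = m₂.items.map (maskx x)

theorem keys_of_Rx (x : List String) (m₁ m₂ : PySem.Dict (List String) String) (h : Rx x m₁ m₂) :
    m₁.keys = m₂.keys := by
  have h' := congrArg (List.map Prod.fst) h
  simpa [PySem.Dict.keys, List.map_map, maskx, Function.comp_def] using h'

theorem contains_of_Rx (x : List String) (m₁ m₂ : PySem.Dict (List String) String) (h : Rx x m₁ m₂)
    (y : List String) : m₁.contains y = m₂.contains y := by
  rw [PySem.Dict.contains_eq_decide_mem_keys, PySem.Dict.contains_eq_decide_mem_keys,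
    keys_of_Rx x m₁ m₂ h]

theorem map_maskx_map_if (x y : List String) (w : String) (l : List (List String × String)) :
    (l.map (fun p => if p.1 == y then (y, w) else p)).map (maskx x)
      = (l.map (maskx x)).map (fun q => if q.1 = y then maskx x (y, w) else q) := by
  simp only [List.map_map]
  refine List.map_congr_left ?_
  intro p _
  by_cases hp : p.1 = y <;> simp [maskx, hp]

theorem Rx_insert (x : List String) (m₁ m₂ : PySem.Dict (List String) String) (h : Rx x m₁ m₂)
    (y : List String) (w₁ w₂ : String) (hw : y = x ∨ w₁ = w₂) :
    Rx x (m₁.insert y w₁) (m₂.insert y w₂) := by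
  unfold Rx
  rw [PySem.Dict.items_insert, PySem.Dict.items_insert, ← contains_of_Rx x m₁ m₂ h]
  by_cases hc : m₁.contains y
  · simp only [hc, if_true]
    rw [map_maskx_map_if, map_maskx_map_if, h]
    rcases hw with hw | hw
    · subst hw
      have hm : ∀ w : String, maskx y (y, w) = (y, "") := by intro w; simp [maskx]
      simp only [hm]
    · rw [hw]
  · have hc' : m₁.contains y = false := by simpa using hc
    simp only [hc', Bool.false_eq_true, if_false]
    rw [List.map_append, List.map_append, h]
    rcases hw with hw | hw
    · subst hw; simp [maskx]
    · rw [hw]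

theorem items_insert_self_of_Rx (x : List String) (m₁ m₂ : PySem.Dict (List String) String)
    (h : Rx x m₁ m₂) (v : String) : (m₁.insert x v).items = (m₂.insert x v).items := by
  rw [PySem.Dict.items_insert, PySem.Dict.items_insert, ← contains_of_Rx x m₁ m₂ h]
  have key : ∀ l : List (List String × String),
      l.map (fun p => if p.1 == x then (x, v) else p)
        = (l.map (maskx x)).map (fun q => if q.1 = x then (x, v) else q) := by
    intro l
    simp only [List.map_map]
    refine List.map_congr_left ?_
    intro p _
    by_cases hp : p.1 = x <;> simp [maskx, hp]
  by_cases hc : m₁.contains x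
  · simp only [hc, if_true]
    rw [key, key, h]
  · have hc' : m₁.contains x = false := by simpa using hc
    simp only [hc', Bool.false_eq_true, if_false]
    have hid : ∀ (m : PySem.Dict (List String) String), m.contains x = false →
        m.items.map (maskx x) = m.items := by
      intro m hm
      have hpt : ∀ p ∈ m.items, maskx x p = id p := by
        intro p hp
        have hx : p.1 ≠ x := by
          intro hpx
          have : x ∈ m.keys := by
            simp only [PySem.Dict.keys]
            exact hpx ▸ List.mem_map_of_mem hp
          rw [PySem.Dict.contains_eq_decide_mem_keys] at hm
          simp [this] at hm
        simp [maskx, hx]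
      simpa using List.map_congr_left hpt
    have hc₂ : m₂.contains x = false := by rw [← contains_of_Rx x m₁ m₂ h]; exact hc'
    rw [← hid m₁ hc', ← hid m₂ hc₂, h]

theorem foldIns_Rx (x : List String) (v₁ v₂ : List String → String)
    (hv : ∀ j, j ≠ x → v₁ j = v₂ j) :
    ∀ (lk : List (List String)) (m₁ m₂ : PySem.Dict (List String) String), Rx x m₁ m₂ →
      Rx x (foldIns v₁ m₁ lk) (foldIns v₂ m₂ lk) := by
  intro lk
  induction lk with
  | nil => intro m₁ m₂ h; exact h
  | cons y lk ih =>
    intro m₁ m₂ h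
    simp only [foldIns, List.foldl_cons]
    refine ih _ _ (Rx_insert x m₁ m₂ h y (v₁ y) (v₂ y) ?_)
    by_cases hy : y = x
    · exact Or.inl hy
    · exact Or.inr (hv y hy)

theorem foldIns_append (v : List String → String) (m : PySem.Dict (List String) String)
    (lk : List (List String)) (x : List String) :
    foldIns v m (lk ++ [x]) = (foldIns v m lk).insert x (v x) := by
  simp [foldIns]

theorem aCount (cc : PySem.Dict String String) :
    ∀ (lk : List (List String)) (d : PySem.Dict (List String) String) (p : Int),
      (List.foldl (aStep cc) (d, p) lk).2 = p + ((lk.filter (ncPred cc)).length : Int) := by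
  intro lk
  induction lk with
  | nil => intro d p; simp
  | cons k lk ih =>
    intro d p
    simp only [List.foldl_cons, List.filter_cons]
    by_cases hc : cc.contains (fmtTuple k)
    · have hn : ncPred cc k = false := by simp [ncPred, hc]
      simp [aStep, hc, ih, hn]
    · have hn : ncPred cc k = true := by simp [ncPred, hc]
      simp only [aStep, hc, Bool.false_eq_true, if_false, ih, hn, if_true, List.length_cons]
      push_cast
      omega

theorem enumerate_append_singleton {α : Type} (x : α) :
    ∀ (l : List α) (s : Int),
      PySem.List.enumerate (l ++ [x]) s = PySem.List.enumerate l s ++ [((s + l.length : Int), x)] := by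
  intro l
  induction l with
  | nil => intro s; simp [PySem.List.enumerate_nil, PySem.List.enumerate_cons]
  | cons y l ih =>
    intro s
    simp only [List.cons_append, PySem.List.enumerate_cons, ih (s + 1), List.length_cons]
    have h : s + 1 + (l.length : Int) = s + ((l.length + 1 : Nat) : Int) := by push_cast; omega
    rw [h]

theorem palD_append_custom (cc : PySem.Dict String String) (lk : List (List String))
    (x : List String) (hx : cc.contains (fmtTuple x) = true) :
    palD cc (lk ++ [x]) = palD cc lk := by
  simp [palD, ncPred, List.filter_append, hx]

theorem palD_append_non (cc : PySem.Dict String String) (lk : List (List String))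
    (x : List String) (hx : cc.contains (fmtTuple x) = false) :
    palD cc (lk ++ [x]) = (palD cc lk).insert x
      (PySem.List.pyGetD pvPalette (PySem.Int.mod (((lk.filter (ncPred cc)).length : Int)) 8) "") := by
  have hnc : ncPred cc x = true := by simp [ncPred, hx]
  simp only [palD, List.filter_append, List.filter_cons, List.filter_nil, hnc, if_true]
  rw [enumerate_append_singleton]
  simp [List.foldl_append]

theorem main_fold (cc : PySem.Dict String String) (lk : List (List String)) :
    (List.foldl (aStep cc) (PySem.Dict.empty, 0) lk).1
      = foldIns (vBf cc (palD cc lk)) PySem.Dict.empty lk := by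
  induction lk using List.reverseRecOn with
  | nil => rfl
  | append_singleton lk x ih =>
    rw [List.foldl_append, List.foldl_cons, List.foldl_nil, foldIns_append]
    have h2 := aCount cc lk PySem.Dict.empty 0
    by_cases hx : cc.contains (fmtTuple x)
    · rw [palD_append_custom cc lk x hx]
      simp only [aStep, hx, if_true]
      rw [ih]
      simp [vBf, hx]
    · have hx' : cc.contains (fmtTuple x) = false := by simpa using hx
      rw [palD_append_non cc lk x hx']
      simp only [aStep, hx', Bool.false_eq_true, if_false]
      rw [ih, h2]
      simp only [zero_add]
      have hvx : vBf cc ((palD cc lk).insert x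
          (PySem.List.pyGetD pvPalette (PySem.Int.mod (((lk.filter (ncPred cc)).length : Int)) 8) ""))
          x = PySem.List.pyGetD pvPalette (PySem.Int.mod (((lk.filter (ncPred cc)).length : Int)) 8) "" := by
        simp [vBf, hx', PySem.Dict.get?_insert_self]
      rw [hvx]
      apply PySem.Dict.ext
      apply items_insert_self_of_Rx
      apply foldIns_Rx x _ _ ?_ lk PySem.Dict.empty PySem.Dict.empty rfl
      intro j hj
      simp only [vBf]
      by_cases hjc : cc.contains (fmtTuple j)
      · simp [hjc]
      · simp [hjc, PySem.Dict.get?_insert_of_ne _ _ hj]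

-- ===== VERDICT (by name: the statement is the Claim_ definition above) =====
theorem assign_colors_spec : Claim_equal_assign_colors := by
  intro legend_keys custom_colors _
  show assign_colors legend_keys custom_colors = assign_colors_alt legend_keys custom_colors
  exact congrArg PySem.Dict.items (main_fold (PySem.Dict.mk custom_colors) legend_keys)
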